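-- pv_equiv track=rewrite | github.com/ModelEngine-Group/nexent | backend/services/a2a_client_service.py | _find_url_in_interfaces
-- ===== SOURCE A (Python) =====
-- from typing import Any, AsyncIterator, Dict, List, Optional
--
-- def _find_url_in_interfaces(interfaces: List[Any]) -> str:
--     """Find URL from supportedInterfaces array, preferring http-json-rpc."""
--     json_rpc_protocols = ("http-json-rpc", "jsonrpc", "httpjsonrpc")
--     for iface in interfaces:
--         if iface.get("protocolBinding", "").lower() in json_rpc_protocols:
--             url = iface.get("url", "")
--             if url:
--                 return url
--     for iface in interfaces:
--         url = iface.get("url", "")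
--         if url:
--             return url
--     return ""
-- ===== SOURCE B (Python) =====
-- def _find_url_in_interfaces(interfaces):
--     """Find URL from supportedInterfaces array, preferring http-json-rpc (single pass)."""
--     json_rpc_protocols = {"http-json-rpc", "jsonrpc", "httpjsonrpc"}
--     fallback = ""
--     for iface in interfaces:
--         url = iface.get("url", "")
--         if url and iface.get("protocolBinding", "").lower() in json_rpc_protocols:
--             return url
--         if url and not fallback:
--             fallback = url
--     return fallback
-- ===== Notes on version B (the rewrite author's own statement) =====
-- stated objective: simpler
-- what changed: Replaces A's two sequential scans with one single pass that returns a json-rpc URL eagerly and remembers the first non-empty URL as a fallback.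
import Mathlib
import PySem

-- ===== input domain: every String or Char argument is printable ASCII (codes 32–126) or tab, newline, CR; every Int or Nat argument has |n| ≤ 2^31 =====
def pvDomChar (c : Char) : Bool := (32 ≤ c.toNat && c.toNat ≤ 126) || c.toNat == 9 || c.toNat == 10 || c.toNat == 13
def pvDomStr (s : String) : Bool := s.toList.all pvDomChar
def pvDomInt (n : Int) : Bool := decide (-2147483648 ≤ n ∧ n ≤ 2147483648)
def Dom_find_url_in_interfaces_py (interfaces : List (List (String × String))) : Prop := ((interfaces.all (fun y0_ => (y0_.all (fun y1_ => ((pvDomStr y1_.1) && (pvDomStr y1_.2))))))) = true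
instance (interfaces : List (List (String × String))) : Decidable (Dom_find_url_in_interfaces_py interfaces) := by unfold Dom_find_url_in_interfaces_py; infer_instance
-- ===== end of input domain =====

-- B merges A's two sequential scans into a single pass with an eager return and a fallback accumulator.

-- ===== PORT A =====
-- iface.get(k, "")
def pvGet (iface : List (String × String)) (k : String) : String :=
  (PySem.Dict.mk iface).getD k ""

def pvJsonRpcProtocols : List String := ["http-json-rpc", "jsonrpc", "httpjsonrpc"]

-- first loop of A: return the url of the first json-rpc iface with a non-empty url
def pvALoop1 : List (List (String × String)) → Option String
  | [] => none
  | iface :: rest =>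
    if PySem.Str.lower (pvGet iface "protocolBinding") ∈ pvJsonRpcProtocols then
      let url := pvGet iface "url"
      if url ≠ "" then some url else pvALoop1 rest
    else pvALoop1 rest

-- second loop of A: first non-empty url
def pvALoop2 : List (List (String × String)) → Option String
  | [] => none
  | iface :: rest =>
    let url := pvGet iface "url"
    if url ≠ "" then some url else pvALoop2 rest

def find_url_in_interfaces_py (interfaces : List (List (String × String))) : String :=
  match pvALoop1 interfaces with
  | some u => u
  | none =>
    match pvALoop2 interfaces with
    | some u => u
    | none => ""

-- ===== PORT B =====
-- single pass: eager return on json-rpc match, fallback = first non-empty url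
def pvBGo : List (List (String × String)) → String → String
  | [], fallback => fallback
  | iface :: rest, fallback =>
    let url := pvGet iface "url"
    if url ≠ "" ∧ PySem.Str.lower (pvGet iface "protocolBinding") ∈ pvJsonRpcProtocols then
      url
    else
      pvBGo rest (if url ≠ "" ∧ fallback = "" then url else fallback)

def find_url_in_interfaces_py_alt (interfaces : List (List (String × String))) : String :=
  pvBGo interfaces ""

-- ===== PRECONDITION & SPEC =====
def Spec_find_url_in_interfaces_py (interfaces : List (List (String × String))) (out : String) : Prop := out = find_url_in_interfaces_py_alt interfaces
instance (interfaces : List (List (String × String))) (out : String) : Decidable (Spec_find_url_in_interfaces_py interfaces out) := by unfold Spec_find_url_in_interfaces_py; infer_instance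

-- ===== CLAIM (what is proved, stated in full; the proofs are below) =====
def Claim_equal_find_url_in_interfaces_py : Prop := ∀ (interfaces : List (List (String × String))), Dom_find_url_in_interfaces_py interfaces → Spec_find_url_in_interfaces_py interfaces (find_url_in_interfaces_py interfaces)

-- ===== LEMMAS AND PROOFS =====

-- invariant of B's single pass in terms of A's two loops
theorem pvBGo_eq (xs : List (List (String × String))) (fb : String) :
    pvBGo xs fb =
      match pvALoop1 xs with
      | some u => u
      | none => if fb = "" then (pvALoop2 xs).getD "" else fb := by
  induction xs generalizing fb with
  | nil => simp [pvBGo, pvALoop1, pvALoop2]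
  | cons iface rest ih =>
    simp only [pvBGo, pvALoop1, pvALoop2]
    by_cases hm : PySem.Str.lower (pvGet iface "protocolBinding") ∈ pvJsonRpcProtocols
    · by_cases hu : pvGet iface "url" ≠ ""
      · simp [hm, hu]
      · simp only [not_not] at hu
        simp [hm, hu, ih]
    · by_cases hu : pvGet iface "url" ≠ ""
      · simp only [hm, and_false, if_false, if_pos hu, ih]
        cases pvALoop1 rest with
        | some u => simp
        | none =>
          by_cases hfb : fb = ""
          · simp [hfb, hu]
          · simp [hfb]
      · simp only [not_not] at hu
        simp [hm, hu, ih]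

-- ===== VERDICT (by name: the statement is the Claim_ definition above) =====
theorem find_url_in_interfaces_py_spec : Claim_equal_find_url_in_interfaces_py := by
  intro interfaces _
  unfold Spec_find_url_in_interfaces_py find_url_in_interfaces_py find_url_in_interfaces_py_alt
  rw [pvBGo_eq]
  cases pvALoop1 interfaces with
  | some u => rfl
  | none =>
    cases pvALoop2 interfaces <;> rfl
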